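-- pv_equiv track=rewrite | github.com/AlexPoAi/VK-offee | PACK-warehouse/tools/warehouse_reports_pipeline.py | parse_comment_bullets
-- ===== SOURCE A (Python) =====
-- def parse_comment_bullets(rows: list[list[str]], max_lines: int = 12) -> list[str]:
--     text_chunks: list[str] = []
--     for r in rows:
--         for c in r:
--             cell = c.strip()
--             if cell:
--                 text_chunks.append(cell)
--     merged = "\n".join(text_chunks)
--     lines = [ln.strip() for ln in merged.splitlines() if ln.strip()]
--     # убираем слишком шумные строки
--     lines = [ln for ln in lines if len(ln) >= 3]
--     return lines[:max_lines]
-- ===== SOURCE B (Python) =====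
-- def parse_comment_bullets(rows: list[list[str]], max_lines: int = 12) -> list[str]:
--     out: list[str] = []
--     for r in rows:
--         for c in r:
--             cell = c.strip()
--             if not cell:
--                 continue
--             for ln in cell.splitlines():
--                 s = ln.strip()
--                 if len(s) >= 3:
--                     out.append(s)
--                     if len(out) == max_lines:
--                         return out
--     return out[:max_lines]
-- ===== Notes on version B (the rewrite author's own statement) =====
-- stated objective: alternative
-- what changed: Replaces A's two-phase build-chunks/join-with-newline/re-splitlines pipeline by an early-terminating single pass: lines are emitted as cells are scanned and the scan RETURNS as soon as max_lines lines have been collected, so the rest of the input is never touched (the final slice only remains for the non-positive max_lines case).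
import Mathlib
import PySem

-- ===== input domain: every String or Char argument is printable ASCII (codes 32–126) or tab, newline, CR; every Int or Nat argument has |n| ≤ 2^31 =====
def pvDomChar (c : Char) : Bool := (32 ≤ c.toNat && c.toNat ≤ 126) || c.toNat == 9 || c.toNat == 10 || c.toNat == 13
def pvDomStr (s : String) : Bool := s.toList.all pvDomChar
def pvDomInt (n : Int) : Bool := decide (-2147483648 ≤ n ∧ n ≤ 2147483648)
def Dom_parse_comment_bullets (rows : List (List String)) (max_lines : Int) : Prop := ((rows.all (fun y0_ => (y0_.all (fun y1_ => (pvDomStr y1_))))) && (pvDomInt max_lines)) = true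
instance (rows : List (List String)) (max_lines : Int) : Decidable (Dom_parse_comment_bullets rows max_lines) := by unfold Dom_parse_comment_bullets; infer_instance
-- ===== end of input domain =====

-- B replaces A's build-chunks / join-with-"\n" / re-splitlines two-phase pipeline by an
-- early-terminating single pass that returns as soon as max_lines lines are collected
-- (same return value; no side effects).

-- ===== PORT A =====
def parse_comment_bullets (rows : List (List String)) (max_lines : Int) : List String :=
  let text_chunks : List String := rows.foldl (fun acc r =>
    r.foldl (fun acc c =>
      let cell := PySem.Str.strip c
      if cell ≠ "" then acc ++ [cell] else acc) acc) []
  let merged := PySem.Str.join "\n" text_chunks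
  let lines := ((PySem.Str.splitlines merged).map PySem.Str.strip).filter (fun ln => decide (ln ≠ ""))
  let lines2 := lines.filter (fun ln => decide (3 ≤ PySem.Str.len ln))
  PySem.List.slice lines2 none (some max_lines)

-- ===== PORT B =====
-- the innermost loop: `for ln in cell.splitlines(): … if len(out) == max_lines: return out`
-- (.inl = the early `return out`, .inr = fall through with the accumulator)
def bGoLines (m : Int) : List String → List String → (List String) ⊕ (List String)
  | [], out => .inr out
  | ln :: t, out =>
    let s := PySem.Str.strip ln
    if 3 ≤ PySem.Str.len s then
      let out' := out ++ [s]
      if (out'.length : Int) = m then .inl out' else bGoLines m t out'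
    else bGoLines m t out

-- `for c in r:` with the early return propagated outward
def bGoCells (m : Int) : List String → List String → (List String) ⊕ (List String)
  | [], out => .inr out
  | c :: t, out =>
    let cell := PySem.Str.strip c
    if cell = "" then bGoCells m t out
    else match bGoLines m (PySem.Str.splitlines cell) out with
      | .inl r => .inl r
      | .inr o => bGoCells m t o

-- `for r in rows:` with the early return propagated outward
def bGoRows (m : Int) : List (List String) → List String → (List String) ⊕ (List String)
  | [], out => .inr out
  | r :: t, out =>
    match bGoCells m r out with
    | .inl res => .inl res
    | .inr o => bGoRows m t o

def parse_comment_bullets_alt (rows : List (List String)) (max_lines : Int) : List String :=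
  match bGoRows max_lines rows [] with
  | .inl r => r
  | .inr o => PySem.List.slice o none (some max_lines)

-- ===== PRECONDITION & SPEC =====
def Spec_parse_comment_bullets (rows : List (List String)) (max_lines : Int) (out : List String) : Prop := out = parse_comment_bullets_alt rows max_lines
instance (rows : List (List String)) (max_lines : Int) (out : List String) : Decidable (Spec_parse_comment_bullets rows max_lines out) := by unfold Spec_parse_comment_bullets; infer_instance

-- ===== CLAIM (what is proved, stated in full; the proofs are below) =====
def Claim_equal_parse_comment_bullets : Prop := ∀ (rows : List (List String)) (max_lines : Int), Dom_parse_comment_bullets rows max_lines → Spec_parse_comment_bullets rows max_lines (parse_comment_bullets rows max_lines)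

-- ===== LEMMAS AND PROOFS =====

-- the break-character predicate splitlines uses (literal copy of the one inside PySem.Chars.splitlines)
def pyIsB (c : Char) : Bool :=
  let n := c.toNat
  decide (n = 10) || decide (n = 13) || decide (n = 11) || decide (n = 12) || decide (n = 28) || decide (n = 29) ||
    decide (n = 30) || decide (n = 133) || decide (n = 8232) || decide (n = 8233)

theorem go_acc (isB : Char → Bool) : ∀ (n : Nat) (s cur : List Char) (acc : List (List Char)), s.length = n →
    PySem.Chars.splitlines.go isB s cur acc = acc.reverse ++ PySem.Chars.splitlines.go isB s cur [] := by
  intro n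
  induction n using Nat.strong_induction_on with
  | _ n ih =>
    intro s cur acc hlen
    subst hlen
    match s with
    | [] => rw [PySem.Chars.splitlines.go.eq_1, PySem.Chars.splitlines.go.eq_1]; split <;> simp
    | '\x0d' :: '\n' :: rest =>
        rw [PySem.Chars.splitlines.go.eq_2, PySem.Chars.splitlines.go.eq_2,
            ih rest.length (by simp) rest [] _ rfl, ih rest.length (by simp) rest [] [cur.reverse] rfl]
        simp
    | [c] =>
        rw [PySem.Chars.splitlines.go.eq_3 _ _ _ _ _ (by simp), PySem.Chars.splitlines.go.eq_3 _ _ _ _ _ (by simp)]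
        split
        · rw [ih 0 (by simp) [] [] _ rfl, ih 0 (by simp) [] [] [cur.reverse] rfl]; simp
        · exact ih 0 (by simp) [] (c :: cur) acc rfl
    | c :: c2 :: rest =>
        by_cases hc : c = '\x0d' ∧ c2 = '\n'
        · obtain ⟨rfl, rfl⟩ := hc
          rw [PySem.Chars.splitlines.go.eq_2, PySem.Chars.splitlines.go.eq_2,
              ih rest.length (by simp) rest [] _ rfl, ih rest.length (by simp) rest [] [cur.reverse] rfl]
          simp
        · have hnp : ∀ (r : List Char), c = '\x0d' → c2 :: rest = '\n' :: r → False := by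
            intro r h1 h2; cases h2; exact hc ⟨h1, rfl⟩
          rw [PySem.Chars.splitlines.go.eq_3 _ _ _ _ _ hnp, PySem.Chars.splitlines.go.eq_3 _ _ _ _ _ hnp]
          split
          · rw [ih (c2::rest).length (by simp) _ [] _ rfl,
                ih (c2::rest).length (by simp) _ [] [cur.reverse] rfl]
            simp
          · exact ih (c2::rest).length (by simp) _ (c :: cur) acc rfl

theorem go_split : ∀ (n : Nat) (a b cur : List Char), a.length = n → a ≠ [] →
    (∀ c, a.getLast? = some c → pyIsB c = false) →
    PySem.Chars.splitlines.go pyIsB (a ++ '\n' :: b) cur [] =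
      PySem.Chars.splitlines.go pyIsB a cur [] ++ PySem.Chars.splitlines.go pyIsB b [] [] := by
  intro n
  induction n using Nat.strong_induction_on with
  | _ n ih =>
    intro a b cur hlen hne hlast
    subst hlen
    match a, hne with
    | [c], _ =>
      have hc : pyIsB c = false := hlast c rfl
      have hcr : c ≠ '\x0d' := by rintro rfl; simp [pyIsB] at hc
      have hnp : ∀ (r : List Char), c = '\x0d' → '\n' :: b = '\n' :: r → False := fun r h1 _ => hcr h1
      rw [List.cons_append, List.nil_append,
          PySem.Chars.splitlines.go.eq_3 _ _ _ _ _ hnp]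
      simp only [hc, Bool.false_eq_true, if_false]
      rw [PySem.Chars.splitlines.go.eq_3 _ _ _ '\n' b (fun r h1 _ => absurd h1 (by decide))]
      simp only [show pyIsB '\n' = true from rfl, if_true]
      rw [go_acc _ b.length b [] _ rfl]
      rw [PySem.Chars.splitlines.go.eq_3 _ _ _ c [] (fun r h1 h2 => by cases h2)]
      simp only [hc, Bool.false_eq_true, if_false]
      rw [PySem.Chars.splitlines.go.eq_1]
      simp
    | c1 :: c2 :: rest, _ =>
      have hlast' : ∀ c, (c2 :: rest).getLast? = some c → pyIsB c = false := by
        intro c hcc; exact hlast c (by rwa [List.getLast?_cons_cons])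
      by_cases hc : c1 = '\x0d' ∧ c2 = '\n'
      · obtain ⟨rfl, rfl⟩ := hc
        match rest, hlast' with
        | [], h => exact absurd (h '\n' rfl) (by decide)
        | r1 :: rest', hlast'' =>
          have hlast3 : ∀ c, (r1 :: rest').getLast? = some c → pyIsB c = false := by
            intro c hcc; exact hlast'' c (by rwa [List.getLast?_cons_cons])
          simp only [List.cons_append]
          rw [PySem.Chars.splitlines.go.eq_2, PySem.Chars.splitlines.go.eq_2,
              go_acc _ _ _ [] [cur.reverse] rfl, go_acc _ _ (r1::rest') [] [cur.reverse] rfl,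
              ← List.cons_append (a := r1) (as := rest') (bs := '\n' :: b),
              ih (r1::rest').length (by simp) _ b [] rfl (by simp) hlast3]
          simp
      · have hnp : ∀ (r : List Char), c1 = '\x0d' → c2 :: (rest ++ '\n' :: b) = '\n' :: r → False := by
          intro r h1 h2; cases h2; exact hc ⟨h1, rfl⟩
        have hnp2 : ∀ (r : List Char), c1 = '\x0d' → c2 :: rest = '\n' :: r → False := by
          intro r h1 h2; cases h2; exact hc ⟨h1, rfl⟩
        simp only [List.cons_append]
        rw [PySem.Chars.splitlines.go.eq_3 _ _ _ _ _ hnp,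
            PySem.Chars.splitlines.go.eq_3 _ _ _ _ _ hnp2]
        by_cases hb : pyIsB c1 = true
        · simp only [hb, if_true]
          rw [← List.cons_append (a := c2) (as := rest) (bs := '\n' :: b),
              go_acc _ _ _ [] [cur.reverse] rfl, go_acc _ _ (c2::rest) [] [cur.reverse] rfl,
              ih (c2::rest).length (by simp) _ b [] rfl (by simp) hlast']
          simp
        · simp only [eq_false_of_ne_true hb, Bool.false_eq_true, if_false]
          rw [← List.cons_append (a := c2) (as := rest) (bs := '\n' :: b),
              ih (c2::rest).length (by simp) _ b (c1 :: cur) rfl (by simp) hlast']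

theorem pyIsB_isspace (c : Char) (h : pyIsB c = true) : PySem.Chars.isspace c = true := by
  simp only [pyIsB, PySem.Chars.isspace, Bool.or_eq_true, Bool.and_eq_true, decide_eq_true_eq] at *
  omega

theorem last_rstrip (l : List Char) (c : Char) (h : (PySem.Chars.rstrip l).getLast? = some c) :
    PySem.Chars.isspace c = false := by
  unfold PySem.Chars.rstrip at h
  rw [List.getLast?_reverse] at h
  have := List.head?_dropWhile_not PySem.Chars.isspace l.reverse
  rw [h] at this
  simpa using this

theorem split_intercalate : ∀ ls : List (List Char),
    (∀ l ∈ ls, l ≠ [] ∧ ∀ c, l.getLast? = some c → pyIsB c = false) →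
    PySem.Chars.splitlines (PySem.Chars.join ['\n'] ls) = ls.flatMap PySem.Chars.splitlines := by
  intro ls
  induction ls with
  | nil => intro _; rfl
  | cons x t iht =>
    intro h
    match t with
    | [] => simp [PySem.Chars.join, List.intercalate]
    | y :: t' =>
      have hx := h x (by simp)
      have hstep : PySem.Chars.join ['\n'] (x :: y :: t') = x ++ '\n' :: PySem.Chars.join ['\n'] (y :: t') := by
        simp [PySem.Chars.join, List.intercalate, List.intersperse]
      rw [hstep]
      show PySem.Chars.splitlines.go pyIsB _ [] [] = _
      rw [go_split x.length x _ [] rfl hx.1 hx.2]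
      rw [List.flatMap_cons]
      congr 1
      exact iht (fun l hl => h l (by simp [hl]))

-- string-level join/splitlines over stripped nonempty chunks
theorem str_split_join (chunks : List String)
    (h : ∀ ch ∈ chunks, (∃ c0, ch = PySem.Str.strip c0) ∧ ch ≠ "") :
    PySem.Str.splitlines (PySem.Str.join "\n" chunks) = chunks.flatMap PySem.Str.splitlines := by
  have hl : ∀ l ∈ chunks.map String.toList, l ≠ [] ∧ ∀ c, l.getLast? = some c → pyIsB c = false := by
    intro l hml
    obtain ⟨ch, hch, rfl⟩ := List.mem_map.mp hml
    obtain ⟨⟨c0, rfl⟩, hne⟩ := h ch hch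
    refine ⟨fun hnil => hne (String.toList_eq_nil_iff.mp hnil), ?_⟩
    intro c hc
    rw [PySem.Str.toList_strip] at hc
    have hs : PySem.Chars.isspace c = false := last_rstrip _ _ hc
    by_contra hb
    rw [pyIsB_isspace c (by revert hb; cases pyIsB c <;> simp)] at hs
    exact absurd hs (by simp)
  unfold PySem.Str.splitlines
  rw [PySem.Str.toList_join, show "\n".toList = ['\n'] from rfl,
      split_intercalate _ hl, List.map_flatMap, List.flatMap_map]

-- comprehension folds: append-if loops collected as map + filter
theorem foldl_strip_append (p : String → Prop) [DecidablePred p] :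
    ∀ (L : List String) (acc : List String),
    L.foldl (fun a x => if p (PySem.Str.strip x) then a ++ [PySem.Str.strip x] else a) acc
      = acc ++ (L.map PySem.Str.strip).filter (fun s => decide (p s)) := by
  intro L
  induction L with
  | nil => simp
  | cons x t iht =>
    intro acc
    simp only [List.foldl_cons, List.map_cons]
    by_cases hp : p (PySem.Str.strip x)
    · rw [if_pos hp, iht, List.filter_cons_of_pos (by simpa using hp)]; simp
    · rw [if_neg hp, iht, List.filter_cons_of_neg (by simpa using hp)]

-- per-line filter used on both sides
def keepLines (ch : String) : List String :=
  ((PySem.Str.splitlines ch).map PySem.Str.strip).filter (fun s => decide (3 ≤ PySem.Str.len s))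

-- the lines one cell contributes
def keepCell (c : String) : List String :=
  if PySem.Str.strip c = "" then [] else keepLines (PySem.Str.strip c)

-- the full (unsliced) list of bullet lines
def fullList (rows : List (List String)) : List String :=
  (rows.flatMap id).flatMap keepCell

-- A's double row/cell loop flattened to one cell list
theorem foldl_rows (g : List String → String → List String) :
    ∀ (rows : List (List String)) (acc : List String),
    rows.foldl (fun acc r => r.foldl g acc) acc = (rows.flatMap id).foldl g acc := by
  intro rows
  induction rows with
  | nil => simp
  | cons r t iht => intro acc; simp only [List.foldl_cons, List.flatMap_cons, List.foldl_append, id]; rw [iht]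

-- a string of length ≥ 3 is nonempty
theorem len3_ne (s : String) (h : decide (3 ≤ PySem.Str.len s) = true) : s ≠ "" := by
  rintro rfl; simp [PySem.Str.len] at h

-- filter distributes over flatMap
theorem filter_flatMap' {α β : Type} (p : β → Bool) (g : α → List β) (l : List α) :
    (l.flatMap g).filter p = l.flatMap (fun x => (g x).filter p) := by
  induction l with
  | nil => rfl
  | cons x t iht => simp only [List.flatMap_cons, List.filter_append, iht]

-- flatMap over the filtered stripped cells = flatMap with an if
theorem flatMap_filter_strip (g : String → List String) (cells : List String) :
    (((cells.map PySem.Str.strip).filter (fun s => decide (s ≠ ""))).flatMap g)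
      = cells.flatMap (fun c => if PySem.Str.strip c = "" then [] else g (PySem.Str.strip c)) := by
  induction cells with
  | nil => rfl
  | cons x t iht =>
    simp only [List.map_cons, List.flatMap_cons]
    by_cases hx : PySem.Str.strip x = ""
    · rw [List.filter_cons_of_neg (by simp [hx]), if_pos hx, iht]; simp
    · rw [List.filter_cons_of_pos (by simp [hx]), if_neg hx, List.flatMap_cons, iht]

-- A computes the slice of the full bullet list
theorem A_eq_slice (rows : List (List String)) (max_lines : Int) :
    parse_comment_bullets rows max_lines = PySem.List.slice (fullList rows) none (some max_lines) := by
  simp only [parse_comment_bullets]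
  rw [foldl_rows, foldl_strip_append (fun s => s ≠ "")]
  refine congrArg (fun l => PySem.List.slice l none (some max_lines)) ?_
  set cells := rows.flatMap id with hc
  set chunks := (cells.map PySem.Str.strip).filter (fun s => decide (s ≠ "")) with hch
  have hstripped : ∀ ch ∈ chunks, (∃ c0, ch = PySem.Str.strip c0) ∧ ch ≠ "" := by
    intro ch hmem
    rw [hch, List.mem_filter] at hmem
    obtain ⟨hm, hne⟩ := hmem
    obtain ⟨c0, _, rfl⟩ := List.mem_map.mp hm
    exact ⟨⟨c0, rfl⟩, by simpa using hne⟩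
  rw [List.nil_append, str_split_join chunks hstripped, List.map_flatMap, List.filter_filter,
      List.filter_congr (l := List.flatMap _ chunks)
        (q := fun s => decide (3 ≤ PySem.Str.len s))
        (fun a _ => by
          cases h3 : decide (3 ≤ PySem.Str.len a)
          · simp
            simp only [PySem.Str.len, decide_eq_false_iff_not, not_le] at h3
            simpa using h3
          · simp [len3_ne a h3]
            simp only [PySem.Str.len, decide_eq_true_eq] at h3
            simpa using h3),
      filter_flatMap', hch,
      flatMap_filter_strip (fun x => ((PySem.Str.splitlines x).map PySem.Str.strip).filter (fun s => decide (3 ≤ PySem.Str.len s)))]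
  rw [hc]
  rfl

-- ===== B: the early-exit loops compute take/slice of the same full list =====

-- the shape every bGo level reduces to
def bRes (m : Int) (F : List String) : (List String) ⊕ (List String) :=
  if 1 ≤ m ∧ m ≤ (F.length : Int) then .inl (F.take m.toNat) else .inr F

theorem bGoLines_eq (m : Int) : ∀ (lns out : List String), (m ≤ 0 ∨ (out.length : Int) < m) →
    bGoLines m lns out = bRes m (out ++ (lns.map PySem.Str.strip).filter (fun s => decide (3 ≤ PySem.Str.len s))) := by
  intro lns
  induction lns with
  | nil =>
    intro out h
    simp only [bGoLines, List.map_nil, List.filter_nil, List.append_nil, bRes]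
    rw [if_neg]; rintro ⟨h1, h2⟩; omega
  | cons ln t iht =>
    intro out h
    simp only [bGoLines, List.map_cons]
    by_cases hk : 3 ≤ PySem.Str.len (PySem.Str.strip ln)
    · rw [if_pos hk, List.filter_cons_of_pos (by simpa using hk)]
      by_cases hm : ((out ++ [PySem.Str.strip ln]).length : Int) = m
      · rw [if_pos hm]
        simp only [bRes]
        rw [if_pos ⟨by simp at hm; omega, by simp at hm ⊢; omega⟩]
        rw [show out ++ PySem.Str.strip ln ::
              List.filter (fun s => decide (3 ≤ PySem.Str.len s)) (List.map PySem.Str.strip t)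
            = (out ++ [PySem.Str.strip ln]) ++
              List.filter (fun s => decide (3 ≤ PySem.Str.len s)) (List.map PySem.Str.strip t) by simp]
        rw [List.take_append_of_le_length (by simp at hm ⊢; omega), List.take_of_length_le (by simp at hm ⊢; omega)]
      · rw [if_neg hm, iht (out ++ [PySem.Str.strip ln]) (by simp at hm ⊢; omega)]
        congr 1
        simp
    · rw [if_neg hk, List.filter_cons_of_neg (by simpa using hk), iht out h]

theorem bRes_pos (m : Int) (F : List String) (h : 1 ≤ m ∧ m ≤ (F.length : Int)) :
    bRes m F = .inl (F.take m.toNat) := by rw [bRes, if_pos h]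

theorem bRes_neg (m : Int) (F : List String) (h : ¬ (1 ≤ m ∧ m ≤ (F.length : Int))) :
    bRes m F = .inr F := by rw [bRes, if_neg h]

theorem bGoCells_eq (m : Int) : ∀ (cells out : List String), (m ≤ 0 ∨ (out.length : Int) < m) →
    bGoCells m cells out = bRes m (out ++ cells.flatMap keepCell) := by
  intro cells
  induction cells with
  | nil =>
    intro out h
    simp only [bGoCells, List.flatMap_nil, List.append_nil]
    rw [bRes_neg _ _ (by rintro ⟨h1, h2⟩; omega)]
  | cons c t iht =>
    intro out h
    simp only [bGoCells, List.flatMap_cons]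
    by_cases hc : PySem.Str.strip c = ""
    · rw [if_pos hc, iht out h]
      simp [keepCell, hc]
    · rw [if_neg hc, bGoLines_eq m _ out h]
      have hkc : keepCell c = (List.map PySem.Str.strip (PySem.Str.splitlines (PySem.Str.strip c))).filter
          (fun s => decide (3 ≤ PySem.Str.len s)) := by
        simp [keepCell, hc, keepLines]
      rw [hkc]
      by_cases hcond : 1 ≤ m ∧ m ≤ ((out ++ (List.map PySem.Str.strip (PySem.Str.splitlines (PySem.Str.strip c))).filter
          (fun s => decide (3 ≤ PySem.Str.len s))).length : Int)
      · have h2 := hcond.2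
        have hlen : m.toNat ≤ (out ++ (List.map PySem.Str.strip (PySem.Str.splitlines (PySem.Str.strip c))).filter
            (fun s => decide (3 ≤ PySem.Str.len s))).length := by
          simp only [List.length_append] at h2 ⊢; omega
        rw [bRes_pos _ _ hcond]
        show Sum.inl _ = _
        rw [bRes_pos _ _ ⟨hcond.1, by simp only [List.length_append] at h2 ⊢; omega⟩,
            ← List.append_assoc, List.take_append_of_le_length hlen]
      · rw [bRes_neg _ _ hcond]
        show bGoCells m t _ = _
        rw [iht _ (by
          by_cases h1 : m ≤ 0
          · exact Or.inl h1
          · right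
            simp only [not_and, not_le] at hcond
            exact hcond (by omega))]
        rw [List.append_assoc]

theorem bGoRows_eq (m : Int) : ∀ (rs : List (List String)) (out : List String), (m ≤ 0 ∨ (out.length : Int) < m) →
    bGoRows m rs out = bRes m (out ++ (rs.flatMap id).flatMap keepCell) := by
  intro rs
  induction rs with
  | nil =>
    intro out h
    simp only [bGoRows, List.flatMap_nil, List.append_nil]
    rw [bRes_neg _ _ (by rintro ⟨h1, h2⟩; omega)]
  | cons r t iht =>
    intro out h
    simp only [bGoRows, List.flatMap_cons, List.flatMap_append, id]
    rw [bGoCells_eq m r out h]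
    by_cases hcond : 1 ≤ m ∧ m ≤ ((out ++ r.flatMap keepCell).length : Int)
    · have h2 := hcond.2
      have hlen : m.toNat ≤ (out ++ r.flatMap keepCell).length := by
        simp only [List.length_append] at h2 ⊢; omega
      rw [bRes_pos _ _ hcond]
      show Sum.inl _ = _
      rw [bRes_pos _ _ ⟨hcond.1, by simp only [List.length_append] at h2 ⊢; omega⟩,
          ← List.append_assoc, List.take_append_of_le_length hlen]
    · rw [bRes_neg _ _ hcond]
      show bGoRows m t _ = _
      rw [iht _ (by
        by_cases h1 : m ≤ 0
        · exact Or.inl h1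
        · right
          simp only [not_and, not_le] at hcond
          exact hcond (by omega))]
      rw [List.append_assoc]

theorem B_eq_slice (rows : List (List String)) (max_lines : Int) :
    parse_comment_bullets_alt rows max_lines = PySem.List.slice (fullList rows) none (some max_lines) := by
  simp only [parse_comment_bullets_alt]
  rw [bGoRows_eq max_lines rows [] (by
        by_cases hm : max_lines ≤ 0
        · exact Or.inl hm
        · exact Or.inr (by simp; omega)),
      List.nil_append]
  by_cases hcond : 1 ≤ max_lines ∧ max_lines ≤ (((rows.flatMap id).flatMap keepCell).length : Int)
  · rw [bRes_pos _ _ hcond]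
    show ((rows.flatMap id).flatMap keepCell).take max_lines.toNat = _
    have h0 : max_lines = ((max_lines.toNat : Nat) : Int) := by omega
    rw [fullList, h0, PySem.List.slice_to_natCast, Int.toNat_natCast]
  · rw [bRes_neg _ _ hcond]
    show PySem.List.slice ((rows.flatMap id).flatMap keepCell) none (some max_lines) = _
    rw [fullList]

-- ===== VERDICT (by name: the statement is the Claim_ definition above) =====
theorem parse_comment_bullets_spec : Claim_equal_parse_comment_bullets := by
  unfold Claim_equal_parse_comment_bullets Spec_parse_comment_bullets
  intro rows max_lines _
  rw [A_eq_slice, B_eq_slice]
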